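-- pv_equiv track=rewrite | github.com/Stanislus29/stangorithms | kmap_algorithm/kmapsolver_final_prototype.py | filter_prime_implicants
-- ===== SOURCE A (Python) =====
-- def filter_prime_implicants(groups):
--     primes = []
--     for g in groups:
--         #For each index in the list 'groups', iterate through the sets in each index and remove duplicates to ensure only prime implicants are obtained
--         # A group is "prime" if it is not fully contained within another larger group.
--
--         """
--         (g < other) for other in groups if other != g asks to check if the current set
--         is a subset of other sets in 'groups' excluding the current indexed set
--         # Example:
--         #   g1 = {(0,0), (0,1)}   (size 2)
--         #   g2 = {(0,0)}          (size 1)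
--         # g2 is redundant, since g1 already covers (0,0).
--         then primes.append(g) returns g1
--         """
--         if not any((g < other) for other in groups if other != g):
--             primes.append(g)
--     return primes
-- ===== SOURCE B (Python) =====
-- def filter_prime_implicants(groups):
--     # Sort the groups by descending size (keeping original indices), sweep once
--     # admitting each group unless it is a proper subset of an already-admitted
--     # one, then restore the original input order.
--     indexed = sorted(enumerate(groups), key=lambda p: -len(p[1]))
--     accepted = []
--     for i, g in indexed:
--         if not any(g < h for _, h in accepted):
--             accepted.append((i, g))
--     accepted.sort(key=lambda p: p[0])
--     return [g for _, g in accepted]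
-- ===== Notes on version B (the rewrite author's own statement) =====
-- stated objective: alternative
-- what changed: Instead of testing every group against every other group, B sorts the groups by descending size (tagged with original indices), sweeps once admitting a group only if it is not a proper subset of an already-admitted maximal group, then restores input order by the stored indices; Pre_ only states the type convention that each inner list encodes a set (distinct elements).
import Mathlib
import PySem

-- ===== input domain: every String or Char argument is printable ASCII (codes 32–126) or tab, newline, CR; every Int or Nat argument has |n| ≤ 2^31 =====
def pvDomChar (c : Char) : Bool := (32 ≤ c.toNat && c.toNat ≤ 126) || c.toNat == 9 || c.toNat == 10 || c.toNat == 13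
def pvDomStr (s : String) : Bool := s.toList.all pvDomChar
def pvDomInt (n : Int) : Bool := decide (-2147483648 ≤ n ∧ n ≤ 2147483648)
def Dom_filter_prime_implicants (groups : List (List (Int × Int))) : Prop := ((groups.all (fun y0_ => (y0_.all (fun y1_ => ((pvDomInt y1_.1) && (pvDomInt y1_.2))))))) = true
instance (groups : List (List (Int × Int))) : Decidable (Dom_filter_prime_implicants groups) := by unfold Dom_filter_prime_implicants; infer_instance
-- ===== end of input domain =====

-- B replaces A's all-pairs subset scan by a descending-size sweep that tests each group only
-- against the already-accepted maximal groups, then restores the input order (objective: alternative).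

-- Python's `s < t` on sets: proper subset (the `<` operator, used by both Pythons)
def pySetLt (s t : List (Int × Int)) : Bool := PySem.Set.issubset s t && !PySem.Set.equal s t

-- ===== PORT A =====
def filter_prime_implicants (groups : List (List (Int × Int))) : List (List (Int × Int)) :=
  groups.foldl
    (fun primes g =>
      if groups.any (fun other => !PySem.Set.equal other g && pySetLt g other) then primes
      else primes ++ [g])
    []

-- ===== PORT B =====
def filter_prime_implicants_alt (groups : List (List (Int × Int))) : List (List (Int × Int)) :=
  let indexed := PySem.List.sorted (PySem.List.enumerate groups 0) (fun p => -(PySem.Set.len p.2)) false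
  let accepted := indexed.foldl
    (fun acc p => if acc.any (fun q => pySetLt p.2 q.2) then acc else acc ++ [p])
    ([] : List (Int × List (Int × Int)))
  (PySem.List.sorted accepted (fun p => p.1) false).map (fun p => p.2)

-- ===== PRECONDITION & SPEC =====
-- Pre_ only states the type convention: each inner list encodes a Python set, so it holds the
-- DISTINCT elements; an inner list with duplicates represents no Python input to A at all.
def Pre_filter_prime_implicants (groups : List (List (Int × Int))) : Prop :=
  ∀ g ∈ groups, g.Nodup
instance (groups : List (List (Int × Int))) : Decidable (Pre_filter_prime_implicants groups) := by
  unfold Pre_filter_prime_implicants; infer_instance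

def pvWitness_filter_prime_implicants : (List (List (Int × Int))) :=
  [[(0, 0), (0, 1)], [(0, 0)], [(1, 1)]]

def Spec_filter_prime_implicants (groups : List (List (Int × Int))) (out : List (List (Int × Int))) : Prop := out = filter_prime_implicants_alt groups
instance (groups : List (List (Int × Int))) (out : List (List (Int × Int))) : Decidable (Spec_filter_prime_implicants groups out) := by unfold Spec_filter_prime_implicants; infer_instance

-- ===== CLAIM (what is proved, stated in full; the proofs are below) =====
def Claim_equal_filter_prime_implicants : Prop := ∀ (groups : List (List (Int × Int))), Dom_filter_prime_implicants groups → Pre_filter_prime_implicants groups → Spec_filter_prime_implicants groups (filter_prime_implicants groups)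

-- ===== LEMMAS AND PROOFS =====

-- "g is prime in groups": g is a proper subset of no member of groups
def pvPrime (groups : List (List (Int × Int))) (g : List (Int × Int)) : Bool :=
  !(groups.any (fun o => pySetLt g o))

lemma pySetLt_iff (g o : List (Int × Int)) :
    pySetLt g o = true ↔ (∀ x ∈ g, x ∈ o) ∧ ¬ (∀ x ∈ o, x ∈ g) := by
  unfold pySetLt
  rw [Bool.and_eq_true, Bool.not_eq_eq_eq_not, Bool.not_true, ← Bool.not_eq_true,
    PySem.Set.issubset_iff, PySem.Set.equal_iff]
  constructor
  · rintro ⟨h1, h2⟩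
    exact ⟨h1, fun h3 => h2 (fun x => ⟨fun hx => h1 x hx, fun hx => h3 x hx⟩)⟩
  · rintro ⟨h1, h2⟩
    exact ⟨h1, fun h3 => h2 (fun x hx => (h3 x).mpr hx)⟩

lemma equal_comm_false {g o : List (Int × Int)} (h : PySem.Set.equal g o = false) :
    PySem.Set.equal o g = false := by
  rw [← Bool.not_eq_true] at h ⊢
  rw [PySem.Set.equal_iff] at h ⊢
  exact fun h2 => h (fun x => (h2 x).symm)

lemma len_lt_of_lt {g o : List (Int × Int)} (hg : g.Nodup) (h : pySetLt g o = true) :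
    g.length < o.length := by
  obtain ⟨h1, h2⟩ := (pySetLt_iff g o).mp h
  push Not at h2
  obtain ⟨x, hxo, hxg⟩ := h2
  have hsub : g.toFinset ⊂ o.toFinset := by
    constructor
    · intro y hy
      simp only [List.mem_toFinset] at *
      exact h1 y hy
    · intro hc
      exact hxg (List.mem_toFinset.mp (hc (List.mem_toFinset.mpr hxo)))
  have h3 : g.toFinset.card < o.toFinset.card := Finset.card_lt_card hsub
  have h4 : g.toFinset.card = g.length := List.toFinset_card_of_nodup hg
  have h5 : o.toFinset.card ≤ o.length := o.toFinset_card_le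
  omega

lemma pySetLt_trans {g h k : List (Int × Int)} (h1 : pySetLt g h = true)
    (h2 : pySetLt h k = true) : pySetLt g k = true := by
  rw [pySetLt_iff] at *
  obtain ⟨s1, n1⟩ := h1
  obtain ⟨s2, n2⟩ := h2
  exact ⟨fun x hx => s2 x (s1 x hx), fun h3 => n1 (fun x hx => h3 x (s2 x hx))⟩

lemma exists_max_len {p : List (Int × Int) → Bool} :
    ∀ (l : List (List (Int × Int))), (∃ o ∈ l, p o = true) →
      ∃ m ∈ l, p m = true ∧ ∀ o ∈ l, p o = true → o.length ≤ m.length := by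
  intro l
  induction l with
  | nil => simp
  | cons a t ih =>
    intro _
    by_cases hex : ∃ o ∈ t, p o = true
    · obtain ⟨m, hm, hpm, hmax⟩ := ih hex
      by_cases hpa : p a = true
      · by_cases hlen : a.length ≤ m.length
        · exact ⟨m, List.mem_cons_of_mem a hm, hpm, by
            intro o ho hpo
            rcases List.mem_cons.mp ho with rfl | ho
            · omega
            · exact hmax o (by simpa using ho) hpo⟩
        · exact ⟨a, List.mem_cons_self, hpa, by
            intro o ho hpo
            rcases List.mem_cons.mp ho with rfl | ho
            · omega
            · have := hmax o (by simpa using ho) hpo; omega⟩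
      · exact ⟨m, List.mem_cons_of_mem a hm, hpm, by
          intro o ho hpo
          rcases List.mem_cons.mp ho with rfl | ho
          · exact absurd hpo hpa
          · exact hmax o (by simpa using ho) hpo⟩
    · refine ⟨a, List.mem_cons_self, ?_, ?_⟩
      · rcases ‹∃ o ∈ a :: t, p o = true› with ⟨o, ho, hpo⟩
        rcases List.mem_cons.mp ho with rfl | ho'
        · exact hpo
        · exact absurd ⟨o, ho', hpo⟩ hex
      · intro o ho hpo
        rcases List.mem_cons.mp ho with rfl | ho
        · omega
        · exact absurd ⟨o, by simpa using ho, hpo⟩ hex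

lemma portA_eq_filter (groups : List (List (Int × Int))) :
    filter_prime_implicants groups = groups.filter (pvPrime groups) := by
  unfold filter_prime_implicants
  have hfun : (fun (primes : List (List (Int × Int))) g =>
      if groups.any (fun other => !PySem.Set.equal other g && pySetLt g other) then primes
      else primes ++ [g])
      = (fun primes g => if pvPrime groups g = true then primes ++ [g] else primes) := by
    funext primes g
    have hcond : groups.any (fun other => !PySem.Set.equal other g && pySetLt g other)
        = groups.any (fun o => pySetLt g o) := by
      refine congrArg _ (funext fun o => ?_)
      by_cases h : pySetLt g o = true
      · have he : PySem.Set.equal g o = false := by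
          unfold pySetLt at h
          rw [Bool.and_eq_true] at h
          simpa using h.2
        simp [h, equal_comm_false he]
      · simp [Bool.eq_false_iff.mpr h]
    rw [hcond]
    unfold pvPrime
    by_cases h : groups.any (fun o => pySetLt g o) = true <;> simp [h]
  rw [hfun, PySem.List.foldl_append_if_eq_filter (p := pvPrime groups)]
  simp

lemma sweep_eq_filter (groups : List (List (Int × Int))) (hN : ∀ g ∈ groups, g.Nodup) :
    ∀ (l acc : List (Int × List (Int × Int))),
      (∀ p ∈ l, p.2 ∈ groups) →
      l.Pairwise (fun a b => b.2.length ≤ a.2.length) →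
      (∀ q ∈ acc, q.2 ∈ groups ∧ pvPrime groups q.2 = true) →
      (∀ h ∈ groups, pvPrime groups h = true →
        (∃ q ∈ acc, q.2 = h) ∨ (∃ q ∈ l, q.2 = h)) →
      l.foldl (fun acc p => if acc.any (fun q => pySetLt p.2 q.2) then acc else acc ++ [p]) acc
        = acc ++ l.filter (fun p => pvPrime groups p.2) := by
  intro l
  induction l with
  | nil => intro acc _ _ _ _; simp
  | cons p t ih =>
    intro acc hl hsorted hacc hcomp
    rw [List.pairwise_cons] at hsorted
    obtain ⟨hhead, hsorted'⟩ := hsorted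
    by_cases hp : pvPrime groups p.2 = true
    · -- p is prime: the test against acc fails, p is accepted
      have htest : acc.any (fun q => pySetLt p.2 q.2) = false := by
        rw [← Bool.not_eq_true, List.any_eq_true]
        rintro ⟨q, hq, hlt⟩
        have hqg := (hacc q hq).1
        have : groups.any (fun o => pySetLt p.2 o) = true :=
          List.any_eq_true.mpr ⟨q.2, hqg, hlt⟩
        unfold pvPrime at hp
        simp [this] at hp
      simp only [List.foldl_cons, htest, Bool.false_eq_true, if_false]
      rw [ih (acc ++ [p]) (fun q hq => hl q (List.mem_cons_of_mem p hq)) hsorted'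
        (by
          intro q hq
          rcases List.mem_append.mp hq with hq | hq
          · exact hacc q hq
          · simp only [List.mem_singleton] at hq
            subst hq
            exact ⟨hl _ List.mem_cons_self, hp⟩)
        (by
          intro h hh hph
          rcases hcomp h hh hph with ⟨q, hq, rfl⟩ | ⟨q, hq, rfl⟩
          · exact Or.inl ⟨q, List.mem_append_left _ hq, rfl⟩
          · rcases List.mem_cons.mp hq with rfl | hq
            · exact Or.inl ⟨q, List.mem_append_right _ (List.mem_singleton_self q), rfl⟩
            · exact Or.inr ⟨q, hq, rfl⟩)]
      simp [hp]
    · -- p is not prime: some accepted maximal superset rejects it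
      have hpg : p.2 ∈ groups := hl p List.mem_cons_self
      have hex : ∃ o ∈ groups, pySetLt p.2 o = true := by
        unfold pvPrime at hp
        simpa using hp
      obtain ⟨m, hm, hpm, hmax⟩ := exists_max_len groups hex
      have hprime_m : pvPrime groups m = true := by
        unfold pvPrime
        rw [Bool.not_eq_eq_eq_not, Bool.not_true, ← Bool.not_eq_true, List.any_eq_true]
        rintro ⟨k, hk, hlt⟩
        have h1 : pySetLt p.2 k = true := pySetLt_trans hpm hlt
        have h2 : k.length ≤ m.length := hmax k hk h1
        have h3 : m.length < k.length := len_lt_of_lt (hN m hm) hlt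
        omega
      have hmlen : p.2.length < m.length := len_lt_of_lt (hN p.2 hpg) hpm
      have hm_in_acc : ∃ q ∈ acc, q.2 = m := by
        rcases hcomp m hm hprime_m with h | ⟨q, hq, rfl⟩
        · exact h
        · rcases List.mem_cons.mp hq with rfl | hq
          · omega
          · have := hhead q hq; omega
      obtain ⟨q, hq, rfl⟩ := hm_in_acc
      have htest : acc.any (fun r => pySetLt p.2 r.2) = true :=
        List.any_eq_true.mpr ⟨q, hq, hpm⟩
      simp only [List.foldl_cons, htest, if_true]
      rw [ih acc (fun r hr => hl r (List.mem_cons_of_mem p hr)) hsorted' hacc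
        (by
          intro h hh hph
          rcases hcomp h hh hph with h | ⟨r, hr, rfl⟩
          · exact Or.inl h
          · rcases List.mem_cons.mp hr with rfl | hr
            · exact absurd hph (by simpa using hp)
            · exact Or.inr ⟨r, hr, rfl⟩)]
      simp [hp]

lemma map_snd_filter_enumerate (f : List (Int × Int) → Bool) :
    ∀ (xs : List (List (Int × Int))) (s : Int),
      (((PySem.List.enumerate xs s).filter (fun p => f p.2)).map (fun p => p.2)) = xs.filter f := by
  intro xs
  induction xs with
  | nil => intro s; simp [PySem.List.enumerate_nil]
  | cons x t ih =>
    intro s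
    rw [PySem.List.enumerate_cons]
    by_cases h : f x = true
    · simp [h, ih (s + 1)]
    · simp [h, ih (s + 1)]

lemma ports_agree (groups : List (List (Int × Int)))
    (hpre : Pre_filter_prime_implicants groups) :
    filter_prime_implicants groups = filter_prime_implicants_alt groups := by
  rw [portA_eq_filter]
  unfold filter_prime_implicants_alt
  set e := PySem.List.enumerate groups 0 with he
  set s := PySem.List.sorted e (fun p => -(PySem.Set.len p.2)) false with hs
  have hperm : s.Perm e := PySem.List.sorted_perm ..
  have hl : ∀ p ∈ s, p.2 ∈ groups := by
    intro p hp
    have : p ∈ e := (PySem.List.mem_sorted ..).mp hp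
    rw [he, PySem.List.mem_enumerate_iff] at this
    obtain ⟨k, hk, rfl⟩ := this
    exact List.getElem_mem hk
  have hsorted : s.Pairwise (fun a b => b.2.length ≤ a.2.length) := by
    have := PySem.List.sorted_pairwise (xs := e) (key := fun p => -(PySem.Set.len p.2))
    rw [← hs] at this
    refine this.imp ?_
    intro a b hab
    simp only [PySem.Set.len, neg_le_neg_iff, Int.ofNat_le] at hab
    omega
  have hcomp : ∀ h ∈ groups, pvPrime groups h = true →
      (∃ q ∈ ([] : List (Int × List (Int × Int))), q.2 = h) ∨ (∃ q ∈ s, q.2 = h) := by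
    intro h hh _
    obtain ⟨k, hk, rfl⟩ := List.mem_iff_getElem.mp hh
    refine Or.inr ⟨((0 : Int) + k, groups[k]), ?_, rfl⟩
    rw [hperm.mem_iff, he, PySem.List.mem_enumerate_iff]
    exact ⟨k, hk, rfl⟩
  rw [show (have indexed := s;
      have accepted := List.foldl (fun acc p => if (acc.any fun q => pySetLt p.2 q.2) = true then acc else acc ++ [p]) [] indexed;
      List.map (fun p => p.2) (PySem.List.sorted accepted fun p => p.1)) =
      List.map (fun p => p.2) (PySem.List.sorted (List.foldl (fun acc p => if (acc.any fun q => pySetLt p.2 q.2) = true then acc else acc ++ [p]) [] s) fun p => p.1) from rfl]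
  rw [sweep_eq_filter groups hpre s [] hl hsorted (by simp) hcomp, List.nil_append]
  have hperm2 : ((e.filter (fun p => pvPrime groups p.2)).Perm
      (s.filter (fun p => pvPrime groups p.2))) := (hperm.filter _).symm
  have hpw : (e.filter (fun p => pvPrime groups p.2)).Pairwise
      (fun a b => a.1 < b.1) := by
    refine List.Pairwise.filter _ ?_
    rw [he]
    exact PySem.List.pairwise_lt_enumerate ..
  rw [PySem.List.sorted_eq_of_perm_of_pairwise_lt _ _ (fun p => p.1) hperm2 hpw, he,
    map_snd_filter_enumerate]

-- ===== VERDICT (by name: the statement is the Claim_ definition above) =====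
theorem filter_prime_implicants_spec : Claim_equal_filter_prime_implicants := by
  intro groups _ hpre
  unfold Spec_filter_prime_implicants
  exact ports_agree groups hpre
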